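-- pv_equiv track=rewrite | github.com/pypi-data/pypi-mirror-82 | packages/smallparts/smallparts-1.0.0.tar.gz/smallparts-1.0.0/smallparts/sequences.py | raw_join
-- ===== SOURCE A (Python) =====
-- DEFAULT_SEPARATOR = ','
--
-- def raw_join(iterable,
--              prefix=None,
--              separator=DEFAULT_SEPARATOR,
--              final_separator=None,
--              suffix=None):
--     """Return a unicode string containing the list items
--     joined together according to the provided parameters
--     """
--     final_separator = final_separator or separator
--     words_sequence = [str(item) for item in iterable]
--     items_list = words_sequence[:-2]
--     items_list.append(final_separator. join(words_sequence[-2:]))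
--     return ''.join((prefix or '',
--                     separator.join(items_list),
--                     suffix or ''))
-- ===== SOURCE B (Python) =====
-- DEFAULT_SEPARATOR = ','
--
--
-- def raw_join(iterable,
--              prefix=None,
--              separator=DEFAULT_SEPARATOR,
--              final_separator=None,
--              suffix=None):
--     """Single pass over the items: emit each word preceded by the link
--     chosen for its gap (the final gap gets the final separator), with no
--     slicing and no nested joins.
--     """
--     words = [str(item) for item in iterable]
--     last = len(words) - 1
--     parts = [prefix or '']
--     for i, word in enumerate(words):
--         if i > 0:
--             parts.append((final_separator or separator) if i == last
--                          else separator)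
--         parts.append(word)
--     parts.append(suffix or '')
--     return ''.join(parts)
-- ===== Notes on version B (the rewrite author's own statement) =====
-- stated objective: alternative
-- what changed: B replaces A's slice-and-append-then-join scheme (copy words[:-2], append final_separator.join(words[-2:]), separator.join the modified list) with a single enumerated pass that appends, for every gap, the link chosen by the gap's position (final gap gets the final separator) into one flat parts list joined once at the end.
import Mathlib
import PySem

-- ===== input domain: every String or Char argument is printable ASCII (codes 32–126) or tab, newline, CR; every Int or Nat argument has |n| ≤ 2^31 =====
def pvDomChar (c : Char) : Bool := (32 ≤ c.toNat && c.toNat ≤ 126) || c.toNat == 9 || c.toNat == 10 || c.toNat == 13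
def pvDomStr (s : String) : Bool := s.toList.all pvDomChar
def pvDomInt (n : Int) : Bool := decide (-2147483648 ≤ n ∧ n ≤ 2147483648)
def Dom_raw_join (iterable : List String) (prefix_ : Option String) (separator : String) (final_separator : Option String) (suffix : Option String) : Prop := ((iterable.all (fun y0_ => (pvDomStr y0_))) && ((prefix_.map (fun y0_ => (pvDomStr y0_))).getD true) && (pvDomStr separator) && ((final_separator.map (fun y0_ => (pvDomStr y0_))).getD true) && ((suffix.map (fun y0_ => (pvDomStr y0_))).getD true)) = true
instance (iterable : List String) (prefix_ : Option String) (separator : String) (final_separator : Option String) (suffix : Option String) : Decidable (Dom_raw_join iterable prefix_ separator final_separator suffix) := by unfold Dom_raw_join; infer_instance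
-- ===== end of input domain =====

-- B replaces A's slice-and-append-then-join scheme with a single enumerated pass
-- that appends each word preceded by the link chosen for its gap (alternative decomposition).

-- `x or y` on an Option String (None and '' are falsy)
def pyOrStr (o : Option String) (d : String) : String :=
  match o with
  | none => d
  | some s => if s = "" then d else s

-- ===== PORT A =====
def raw_join (iterable : List String) (prefix_ : Option String) (separator : String) (final_separator : Option String) (suffix : Option String) : String :=
  let final_sep := pyOrStr final_separator separator
  let words_sequence := iterable            -- [str(item) for item in iterable]: items are already strings
  let items_list := PySem.List.slice words_sequence none (some (-2))
      ++ [PySem.Str.join final_sep (PySem.List.slice words_sequence (some (-2)) none)]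
  PySem.Str.join "" [pyOrStr prefix_ "", PySem.Str.join separator items_list, pyOrStr suffix ""]

-- ===== PORT B =====
def raw_join_alt (iterable : List String) (prefix_ : Option String) (separator : String) (final_separator : Option String) (suffix : Option String) : String :=
  let words := iterable                     -- [str(item) for item in iterable]: items are already strings
  let last : Int := (words.length : Int) - 1
  let parts := (PySem.List.enumerate words 0).foldl
      (fun (acc : List String) (iw : Int × String) =>
        (if 0 < iw.1 then
            acc ++ [if iw.1 = last then pyOrStr final_separator separator else separator]
          else acc) ++ [iw.2])
      [pyOrStr prefix_ ""]
  PySem.Str.join "" (parts ++ [pyOrStr suffix ""])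

-- ===== PRECONDITION & SPEC =====
def Spec_raw_join (iterable : List String) (prefix_ : Option String) (separator : String) (final_separator : Option String) (suffix : Option String) (out : String) : Prop := out = raw_join_alt iterable prefix_ separator final_separator suffix
instance (iterable : List String) (prefix_ : Option String) (separator : String) (final_separator : Option String) (suffix : Option String) (out : String) : Decidable (Spec_raw_join iterable prefix_ separator final_separator suffix out) := by unfold Spec_raw_join; infer_instance

-- ===== CLAIM (what is proved, stated in full; the proofs are below) =====
def Claim_equal_raw_join : Prop := ∀ (iterable : List String) (prefix_ : Option String) (separator : String) (final_separator : Option String) (suffix : Option String), Dom_raw_join iterable prefix_ separator final_separator suffix → Spec_raw_join iterable prefix_ separator final_separator suffix (raw_join iterable prefix_ separator final_separator suffix)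

-- ===== LEMMAS AND PROOFS =====

-- every list of length ≥ 2 is xs ++ [y, z]
lemma exists_snoc_snoc {α : Type} (ws : List α) (h : 2 ≤ ws.length) :
    ∃ xs y z, ws = xs ++ [y, z] := by
  rcases List.eq_nil_or_concat ws with rfl | ⟨w1, z, rfl⟩
  · simp at h
  rcases List.eq_nil_or_concat w1 with rfl | ⟨xs, y, rfl⟩
  · simp at h
  exact ⟨xs, y, z, by simp⟩

-- B's loop over the middle items (index strictly between 0 and last) just interleaves `sep`
lemma fold_mid (sep fsep : String) (last : Int) :
    ∀ (xs : List String) (k : Int) (acc : List String), 1 ≤ k → k + xs.length ≤ last →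
    (PySem.List.enumerate xs k).foldl
      (fun (acc : List String) (iw : Int × String) =>
        (if 0 < iw.1 then acc ++ [if iw.1 = last then fsep else sep] else acc) ++ [iw.2]) acc
    = acc ++ xs.flatMap (fun w => [sep, w]) := by
  intro xs
  induction xs with
  | nil => intro k acc _ _; simp [PySem.List.enumerate_nil]
  | cons x t ih =>
    intro k acc hk hle
    simp only [List.length_cons] at hle
    rw [PySem.List.enumerate_cons, List.foldl_cons]
    have h0 : 0 < k := by omega
    have hne : k ≠ last := by push_cast at hle; omega
    rw [if_pos h0, if_neg hne, ih (k+1) _ (by omega) (by push_cast at hle ⊢; omega)]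
    simp

-- shifting the accumulator out of the concatenation fold
lemma foldl_toList_shift : ∀ (ws : List String) (cs : List Char),
    ws.foldl (fun cs w => cs ++ w.toList) cs = cs ++ ws.foldl (fun cs w => cs ++ w.toList) [] := by
  intro ws
  induction ws with
  | nil => intro cs; simp
  | cons w t ih =>
    intro cs
    simp only [List.foldl_cons, List.nil_append]
    rw [ih, ih (w.toList)]
    simp

-- A's separator.join over a nonempty tail, as a flat interleaving
lemma join_eq_interleave (sep : String) :
    ∀ (l : List String) (a : String),
    (PySem.Str.join sep (a :: l)).toList
      = a.toList ++ (l.flatMap (fun w => [sep, w])).foldl (fun cs w => cs ++ w.toList) [] := by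
  intro l
  induction l with
  | nil => intro a; simp [PySem.Str.join, PySem.Chars.join_singleton]
  | cons b t ih =>
    intro a
    have : (PySem.Str.join sep (a :: b :: t)).toList
        = a.toList ++ sep.toList ++ (PySem.Str.join sep (b :: t)).toList := by
      simp [PySem.Str.join, PySem.Chars.join_cons_cons]
    rw [this, ih b]
    simp only [List.flatMap_cons, List.foldl_append]
    rw [foldl_toList_shift]
    simp

-- ''.join of a list of strings, as the fold of toLists
lemma join_empty_toList :
    ∀ (l : List String), (PySem.Str.join "" l).toList = l.foldl (fun cs w => cs ++ w.toList) [] := by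
  intro l
  induction l with
  | nil => simp [PySem.Str.join, PySem.Chars.join_nil]
  | cons a t ih =>
    cases t with
    | nil => simp [PySem.Str.join, PySem.Chars.join_singleton]
    | cons b t' =>
      have : (PySem.Str.join "" (a :: b :: t')).toList
          = a.toList ++ (PySem.Str.join "" (b :: t')).toList := by
        simp [PySem.Str.join, PySem.Chars.join_cons_cons]
      rw [this, ih]
      conv_rhs => rw [List.foldl_cons, List.nil_append, foldl_toList_shift (b :: t') (a.toList)]

-- the concatenation fold distributes over list append
lemma foldl_toList_split (l1 l2 : List String) :
    (l1 ++ l2).foldl (fun cs w => cs ++ w.toList) ([] : List Char)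
      = l1.foldl (fun cs w => cs ++ w.toList) [] ++ l2.foldl (fun cs w => cs ++ w.toList) [] := by
  rw [List.foldl_append, foldl_toList_shift]

theorem raw_join_spec : Claim_equal_raw_join := by
  intro iterable prefix_ separator final_separator suffix _
  unfold Spec_raw_join raw_join raw_join_alt
  dsimp only
  apply String.toList_inj.mp
  by_cases h2 : 2 ≤ iterable.length
  · obtain ⟨xs, y, z, rfl⟩ := exists_snoc_snoc iterable h2
    have hlen : (xs ++ [y, z]).length - 2 = xs.length := by simp
    rw [PySem.List.slice_to_neg_ofNat _ 2 (by omega),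
        PySem.List.slice_from_neg_ofNat _ 2 (by omega), hlen]
    have htake : (xs ++ [y, z]).take xs.length = xs := by simp
    have hdrop : (xs ++ [y, z]).drop xs.length = [y, z] := by simp
    rw [htake, hdrop]
    cases xs with
    | nil =>
      simp [PySem.List.enumerate_cons, PySem.List.enumerate_nil, PySem.Str.join, PySem.Chars.join_cons_cons,
            PySem.Chars.join_singleton]
    | cons a xs' =>
      have hB : PySem.List.enumerate ((a :: xs') ++ [y, z]) 0
          = (0, a) :: (PySem.List.enumerate xs' 1
              ++ [((1 + xs'.length : Int), y), ((2 + xs'.length : Int), z)]) := by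
        rw [List.cons_append, PySem.List.enumerate_cons, PySem.List.enumerate_append,
            PySem.List.enumerate_cons, PySem.List.enumerate_cons, PySem.List.enumerate_nil]
        norm_num
        omega
      rw [hB]
      set last : Int := (((a :: xs') ++ [y, z]).length : Int) - 1 with hlastdef
      have hlast : last = (xs'.length : Int) + 2 := by simp [hlastdef]
      rw [List.foldl_cons]
      have hstep0 : ((if (0:Int) < 0 then
            [pyOrStr prefix_ ""] ++ [if (0:Int) = last then pyOrStr final_separator separator else separator]
          else [pyOrStr prefix_ ""]) ++ [a]) = [pyOrStr prefix_ "", a] := by simp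
      rw [List.foldl_append, fold_mid separator (pyOrStr final_separator separator) last xs' 1 _
            (le_refl 1) (by rw [hlast]; omega)]
      rw [hstep0]
      have hy : ¬ ((1 + (xs'.length:Int)) = last) := by rw [hlast]; omega
      have hz : ((2 + (xs'.length:Int)) = last) := by rw [hlast]; ring
      simp only [List.foldl_cons, List.foldl_nil]
      rw [if_pos (by positivity : (0:Int) < 1 + xs'.length), if_neg hy,
          if_pos (by positivity : (0:Int) < 2 + xs'.length), if_pos hz]
      -- both sides are now explicit concatenation folds
      rw [join_empty_toList, join_empty_toList]
      have hmid : (PySem.Str.join separator ((a :: xs') ++ [PySem.Str.join (pyOrStr final_separator separator) [y, z]])).toList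
          = a.toList ++ ((xs' ++ [PySem.Str.join (pyOrStr final_separator separator) [y, z]]).flatMap
              (fun w => [separator, w])).foldl (fun cs w => cs ++ w.toList) [] := by
        rw [List.cons_append, join_eq_interleave]
      have hw : (PySem.Str.join (pyOrStr final_separator separator) [y, z]).toList
          = y.toList ++ (pyOrStr final_separator separator).toList ++ z.toList := by
        simp [PySem.Str.join, PySem.Chars.join_cons_cons, PySem.Chars.join_singleton]
      simp only [List.foldl_cons, List.foldl_nil, List.nil_append, hmid,
                 List.flatMap_append, List.flatMap_cons, List.flatMap_nil, List.append_nil]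
      simp only [foldl_toList_split]
      simp [hw, List.append_assoc]
  · -- fewer than two items
    interval_cases h : iterable.length
    · have h0 : iterable = [] := List.eq_nil_of_length_eq_zero h
      subst h0
      simp [PySem.List.slice, PySem.List.enumerate_nil, PySem.Str.join,
            PySem.Chars.join_cons_cons, PySem.Chars.join_singleton, PySem.Chars.join_nil]
    · obtain ⟨a, ha⟩ := List.length_eq_one_iff.mp h
      subst ha
      simp [PySem.List.slice, PySem.List.clampIdx, PySem.List.enumerate_cons,
            PySem.List.enumerate_nil, PySem.Str.join,
            PySem.Chars.join_cons_cons, PySem.Chars.join_singleton]
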